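-- pv_equiv track=rewrite | github.com/yanivcohen1/QGEFT-quantum-gravity-tensor-networks | vacuum_phase1.py | normalize_vacuum_null_models
-- ===== SOURCE A (Python) =====
-- def normalize_vacuum_null_models(raw: tuple[str, ...]) -> tuple[str, ...]:
--     if not raw:
--         return ("shuffle", "erdos-renyi")
--     normalized = tuple(token.strip().lower() for token in raw if token.strip())
--     allowed = {"shuffle", "erdos-renyi"}
--     invalid = sorted(set(normalized) - allowed)
--     if invalid:
--         raise ValueError("vacuum Phase 1 null models must use only: shuffle, erdos-renyi")
--     return tuple(dict.fromkeys(normalized))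
-- ===== SOURCE B (Python) =====
-- def normalize_vacuum_null_models(raw: tuple[str, ...]) -> tuple[str, ...]:
--     if not raw:
--         return ("shuffle", "erdos-renyi")
--     # Record only the FIRST position of each allowed token; validate as we go.
--     first_shuffle = None
--     first_er = None
--     for i, token in enumerate(raw):
--         t = token.strip().lower()
--         if not t:
--             continue
--         if t == "shuffle":
--             if first_shuffle is None:
--                 first_shuffle = i
--         elif t == "erdos-renyi":
--             if first_er is None:
--                 first_er = i
--         else:
--             raise ValueError("vacuum Phase 1 null models must use only: shuffle, erdos-renyi")
--     # Reconstruct the answer in closed form from the two first-occurrence positions.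
--     if first_shuffle is None and first_er is None:
--         return ()
--     if first_er is None:
--         return ("shuffle",)
--     if first_shuffle is None:
--         return ("erdos-renyi",)
--     if first_shuffle < first_er:
--         return ("shuffle", "erdos-renyi")
--     return ("erdos-renyi", "shuffle")
-- ===== Notes on version B (the rewrite author's own statement) =====
-- stated objective: alternative
-- what changed: Instead of building a normalized tuple, validating via set-difference and deduplicating with dict.fromkeys, B records just the first-occurrence index of each of the two allowed tokens in one validating scan and then reconstructs the answer in closed form by comparing those two indices; no intermediate tuple, set, sort or dedup container exists.
import Mathlib
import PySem

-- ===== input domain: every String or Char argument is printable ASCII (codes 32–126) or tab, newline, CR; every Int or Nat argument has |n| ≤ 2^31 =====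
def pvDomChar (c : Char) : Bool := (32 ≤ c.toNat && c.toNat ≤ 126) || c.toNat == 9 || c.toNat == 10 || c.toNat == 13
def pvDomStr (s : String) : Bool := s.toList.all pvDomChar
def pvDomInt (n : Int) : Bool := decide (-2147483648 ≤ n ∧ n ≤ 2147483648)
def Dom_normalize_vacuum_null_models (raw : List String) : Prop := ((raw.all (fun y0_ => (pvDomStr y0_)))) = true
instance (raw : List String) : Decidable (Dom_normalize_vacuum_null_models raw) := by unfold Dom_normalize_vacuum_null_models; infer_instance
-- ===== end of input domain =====

-- B replaces A's normalize/set-difference-validate/dict.fromkeys pipeline by a single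
-- validating scan that records only the first index of each allowed token, then rebuilds
-- the answer in closed form from those two indices (objective: alternative algorithm).

-- ===== PORT A =====
def normalize_vacuum_null_models (raw : List String) : List String :=
  if raw = [] then ["shuffle", "erdos-renyi"]
  else
    let normalized := (raw.filter (fun t => PySem.Str.strip t ≠ "")).map
      (fun t => PySem.Str.lower (PySem.Str.strip t))
    let allowed : PySem.Set String := PySem.Set.ofList ["shuffle", "erdos-renyi"]
    let invalid := PySem.List.sorted (PySem.Set.diff (PySem.Set.ofList normalized) allowed) (fun x => x) false
    if invalid ≠ [] then []  -- Python: raise ValueError; excluded by Pre_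
    else PySem.List.dedup normalized

-- ===== PORT B =====
-- Source B's for-loop over enumerate(raw): first-occurrence index of each allowed token,
-- none = the ValueError branch fired (excluded by Pre_)
def pvScan (l : List String) (i : Int) (fs fe : Option Int) : Option (Option Int × Option Int) :=
  match l with
  | [] => some (fs, fe)
  | token :: rest =>
    let t := PySem.Str.lower (PySem.Str.strip token)
    if t = "" then pvScan rest (i + 1) fs fe
    else if t = "shuffle" then
      pvScan rest (i + 1) (if fs = none then some i else fs) fe
    else if t = "erdos-renyi" then
      pvScan rest (i + 1) fs (if fe = none then some i else fe)
    else none  -- Python: raise ValueError; excluded by Pre_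

-- Source B's closed-form reconstruction from the two first-occurrence positions
def pvRender (fs fe : Option Int) : List String :=
  match fs, fe with
  | none, none => []
  | some _, none => ["shuffle"]
  | none, some _ => ["erdos-renyi"]
  | some si, some ei => if si < ei then ["shuffle", "erdos-renyi"] else ["erdos-renyi", "shuffle"]

def normalize_vacuum_null_models_alt (raw : List String) : List String :=
  if raw = [] then ["shuffle", "erdos-renyi"]
  else
    match pvScan raw 0 none none with
    | none => []  -- Python: raise ValueError; excluded by Pre_
    | some (fs, fe) => pvRender fs fe

-- ===== PRECONDITION & SPEC =====
-- Pre_ excludes exactly the inputs on which A raises ValueError: some token that is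
-- not pure whitespace normalizes (strip+lower) to something other than the two allowed names.
def Pre_normalize_vacuum_null_models (raw : List String) : Prop :=
  ∀ s ∈ raw, PySem.Str.strip s ≠ "" →
    PySem.Str.lower (PySem.Str.strip s) = "shuffle" ∨ PySem.Str.lower (PySem.Str.strip s) = "erdos-renyi"
instance (raw : List String) : Decidable (Pre_normalize_vacuum_null_models raw) := by
  unfold Pre_normalize_vacuum_null_models; infer_instance

def pvWitness_normalize_vacuum_null_models : List String := [" Shuffle ", "erdos-renyi", "  "]

def Spec_normalize_vacuum_null_models (raw : List String) (out : List String) : Prop := out = normalize_vacuum_null_models_alt raw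
instance (raw : List String) (out : List String) : Decidable (Spec_normalize_vacuum_null_models raw out) := by unfold Spec_normalize_vacuum_null_models; infer_instance

-- ===== CLAIM (what is proved, stated in full; the proofs are below) =====
def Claim_equal_normalize_vacuum_null_models : Prop := ∀ (raw : List String), Dom_normalize_vacuum_null_models raw → Pre_normalize_vacuum_null_models raw → Spec_normalize_vacuum_null_models raw (normalize_vacuum_null_models raw)

-- ===== LEMMAS AND PROOFS =====

-- the normalized tuple A builds, as a function
def pvNorm (l : List String) : List String :=
  (l.filter (fun t => PySem.Str.strip t ≠ "")).map (fun t => PySem.Str.lower (PySem.Str.strip t))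

lemma pvNorm_cons (t : String) (l : List String) :
    pvNorm (t :: l) = if PySem.Str.strip t = "" then pvNorm l
      else PySem.Str.lower (PySem.Str.strip t) :: pvNorm l := by
  by_cases h : PySem.Str.strip t = "" <;> simp [pvNorm, h]

lemma pvLower_eq_empty (s : String) : PySem.Str.lower s = "" ↔ s = "" := by
  constructor
  · intro h
    have h2 := congrArg String.toList h
    simp only [PySem.Str.toList_lower, PySem.Chars.lower] at h2
    have h3 : s.toList = [] := by simpa using h2
    exact String.toList_inj.mp (by rw [h3]; rfl)
  · rintro rfl; rfl

-- adding "shuffle" to a rendered pair = bumping the first-shuffle index, when stored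
-- indices are below i (symmetrically for "erdos-renyi")
lemma pvRender_add_sh (fs fe : Option Int) (i : Int)
    (hs : ∀ k, fs = some k → k < i) (he : ∀ k, fe = some k → k < i) :
    pvRender (if fs = none then some i else fs) fe = PySem.Set.add (pvRender fs fe) "shuffle" := by
  match fs, fe with
  | none, none => simp [pvRender, PySem.Set.add, PySem.Set.contains]
  | none, some k =>
    have := he k rfl
    simp [pvRender, PySem.Set.add, PySem.Set.contains, not_lt_of_gt this]
  | some j, none => simp [pvRender, PySem.Set.add, PySem.Set.contains]
  | some j, some k =>
    by_cases h : j < k <;> simp [pvRender, h, PySem.Set.add, PySem.Set.contains]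

lemma pvRender_add_er (fs fe : Option Int) (i : Int)
    (hs : ∀ k, fs = some k → k < i) (he : ∀ k, fe = some k → k < i) :
    pvRender fs (if fe = none then some i else fe) = PySem.Set.add (pvRender fs fe) "erdos-renyi" := by
  match fs, fe with
  | none, none => simp [pvRender, PySem.Set.add, PySem.Set.contains]
  | some j, none =>
    have := hs j rfl
    simp [pvRender, this, PySem.Set.add, PySem.Set.contains]
  | none, some k => simp [pvRender, PySem.Set.add, PySem.Set.contains]
  | some j, some k =>
    by_cases h : j < k <;> simp [pvRender, h, PySem.Set.add, PySem.Set.contains]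

-- B's scan succeeds under Pre_ and its rendered result folds Set.add over A's
-- normalized list, starting from the render of the incoming state
lemma pvScan_eq (l : List String) : ∀ (i : Int) (fs fe : Option Int),
    Pre_normalize_vacuum_null_models l →
    (∀ k, fs = some k → k < i) → (∀ k, fe = some k → k < i) →
    ∃ fs' fe', pvScan l i fs fe = some (fs', fe') ∧
      pvRender fs' fe' = (pvNorm l).foldl PySem.Set.add (pvRender fs fe) := by
  induction l with
  | nil => intro i fs fe _ _ _; exact ⟨fs, fe, rfl, by simp [pvNorm]⟩
  | cons token rest ih =>
    intro i fs fe hpre hs he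
    have hrest : Pre_normalize_vacuum_null_models rest := fun s hs' => hpre s (List.mem_cons_of_mem _ hs')
    rw [pvNorm_cons]
    by_cases hst : PySem.Str.strip token = ""
    · have ht : PySem.Str.lower (PySem.Str.strip token) = "" := by rw [hst]; rfl
      simp only [pvScan, ht, if_pos hst]
      exact ih (i + 1) fs fe hrest (fun k hk => by have := hs k hk; omega)
        (fun k hk => by have := he k hk; omega)
    · have hne : PySem.Str.lower (PySem.Str.strip token) ≠ "" :=
        fun h => hst ((pvLower_eq_empty _).1 h)
      rcases hpre token List.mem_cons_self hst with hv | hv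
      · simp only [pvScan, hv, reduceIte, if_neg hst]
        obtain ⟨fs', fe', h1, h2⟩ := ih (i + 1) (if fs = none then some i else fs) fe hrest
          (fun k hk => by
            by_cases h : fs = none
            · simp [h] at hk; omega
            · simp [h] at hk; have := hs k hk; omega)
          (fun k hk => by have := he k hk; omega)
        refine ⟨fs', fe', h1, ?_⟩
        rw [h2, pvRender_add_sh fs fe i hs he]
        simp
      · have hnsh : PySem.Str.lower (PySem.Str.strip token) ≠ "shuffle" := by
          rw [hv]; decide
        simp only [pvScan, hv, reduceIte, if_neg hst]
        obtain ⟨fs', fe', h1, h2⟩ := ih (i + 1) fs (if fe = none then some i else fe) hrest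
          (fun k hk => by have := hs k hk; omega)
          (fun k hk => by
            by_cases h : fe = none
            · simp [h] at hk; omega
            · simp [h] at hk; have := he k hk; omega)
        refine ⟨fs', fe', h1, ?_⟩
        rw [h2, pvRender_add_er fs fe i hs he]
        simp
  
-- under Pre_, the set difference A sorts is empty
lemma pvInvalid_nil (raw : List String) (hpre : Pre_normalize_vacuum_null_models raw) :
    PySem.Set.diff (PySem.Set.ofList (pvNorm raw)) (PySem.Set.ofList ["shuffle", "erdos-renyi"]) = [] := by
  rw [List.eq_nil_iff_forall_not_mem]
  intro x hx
  simp only [PySem.Set.diff, List.mem_filter] at hx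
  obtain ⟨hmem, hnc⟩ := hx
  have hx' : x ∈ pvNorm raw := (PySem.Set.mem_ofList _ _).1 hmem
  simp only [pvNorm, List.mem_map, List.mem_filter] at hx'
  obtain ⟨t, ⟨ht, hts⟩, rfl⟩ := hx'
  have := hpre t ht (by simpa using hts)
  rcases this with h | h <;> simp [h, PySem.Set.contains, PySem.Set.ofList, PySem.Set.add] at hnc

-- ===== VERDICT (by name: the statement is the Claim_ definition above) =====
theorem normalize_vacuum_null_models_spec : Claim_equal_normalize_vacuum_null_models := by
  intro raw _ hpre
  unfold Spec_normalize_vacuum_null_models normalize_vacuum_null_models normalize_vacuum_null_models_alt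
  by_cases hraw : raw = []
  · simp [hraw]
  · obtain ⟨fs', fe', h1, h2⟩ := pvScan_eq raw 0 none none hpre
      (by intro k hk; cases hk) (by intro k hk; cases hk)
    have hinv := pvInvalid_nil raw hpre
    simp only [pvNorm] at hinv h2
    simp only [if_neg hraw, hinv, h1]
    rw [h2]
    simp [pvRender, PySem.List.dedup_eq_ofList, PySem.Set.ofList_eq_foldl, PySem.List.sorted]
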